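-- pv_equiv track=rewrite | github.com/stahlbia/algoritmos-de-codificacao | tests/test_golomb.py | flip_bit
-- ===== SOURCE A (Python) =====
-- def flip_bit(binary: str, index: int) -> str:
--     """Inverte o bit na posição `index` (ignora espaços na contagem)."""
--     bits = list(binary)
--     bit_idx = 0
--     for i, char in enumerate(bits):
--         if char in "01":
--             if bit_idx == index:
--                 bits[i] = "1" if char == "0" else "0"
--                 return "".join(bits)
--             bit_idx += 1
--     raise IndexError(f"Índice de bit {index} fora do alcance.")
-- ===== SOURCE B (Python) =====
-- def flip_bit(binary: str, index: int) -> str: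
--     """Inverte o bit na posição `index` (ignora espaços na contagem)."""
--     positions = [i for i, c in enumerate(binary) if c in "01"]
--     if not (0 <= index < len(positions)):
--         raise IndexError(f"Índice de bit {index} fora do alcance.")
--     p = positions[index]
--     chars = list(binary)
--     chars[p] = "1" if chars[p] == "0" else "0"
--     return "".join(chars)
-- ===== Notes on version B (the rewrite author's own statement) =====
-- stated objective: alternative
-- what changed: B first builds the list of positions of all bit characters, bounds-checks the index, and flips directly at the looked-up position, instead of A's counting scan with an early return inside the loop.
import Mathlib
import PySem

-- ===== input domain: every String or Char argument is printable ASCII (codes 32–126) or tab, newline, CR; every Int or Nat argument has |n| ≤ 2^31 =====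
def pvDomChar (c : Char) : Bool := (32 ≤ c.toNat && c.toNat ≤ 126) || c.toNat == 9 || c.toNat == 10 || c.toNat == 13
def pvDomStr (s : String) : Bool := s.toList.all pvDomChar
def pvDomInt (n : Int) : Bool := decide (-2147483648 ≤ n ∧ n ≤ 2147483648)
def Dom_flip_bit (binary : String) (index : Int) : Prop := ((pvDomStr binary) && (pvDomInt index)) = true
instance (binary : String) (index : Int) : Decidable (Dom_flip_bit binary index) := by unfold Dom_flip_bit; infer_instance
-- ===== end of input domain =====

-- B builds the list of positions of all bit characters, bounds-checks the index, and flips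
-- directly at the looked-up position, instead of A's counting scan with an early return.
-- Equivalence of the RETURN value is proved on Pre_ (A raises IndexError outside it; B does too).

-- ===== PORT A =====
-- the loop of A: walks the characters carrying the running bit counter `bit_idx`;
-- `c == '0' || c == '1'` is exactly Python's `char in "01"` for a single character.
-- On the raise path A raises IndexError; the port returns [] there (outside Pre_).
def pvGoA (index : Int) : List Char → Int → List Char
  | [], _ => []
  | c :: rest, bitIdx =>
    if c == '0' || c == '1' then
      if bitIdx == index then (if c == '0' then '1' else '0') :: rest
      else c :: pvGoA index rest (bitIdx + 1)
    else c :: pvGoA index rest bitIdx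

def flip_bit (binary : String) (index : Int) : String :=
  String.ofList (pvGoA index binary.toList 0)

-- ===== PORT B =====
-- Source B's comprehension `[i for i, c in enumerate(binary) if c in "01"]` (start kept general for the proof)
def pvPositions (chars : List Char) (s : Int) : List Int :=
  ((PySem.List.enumerate chars s).filter (fun pc => pc.2 == '0' || pc.2 == '1')).map Prod.fst

def flip_bit_alt (binary : String) (index : Int) : String :=
  let chars := binary.toList
  let positions := pvPositions chars 0
  if 0 ≤ index ∧ index < (positions.length : Int) then
    -- bounds just checked, so plain getD indexing is exact here; the raise path returns "" (outside Pre_)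
    let p := (positions.getD index.toNat 0).toNat
    String.ofList (chars.set p (if chars.getD p ' ' == '0' then '1' else '0'))
  else ""

-- ===== PRECONDITION & SPEC =====
-- Pre_: A raises IndexError exactly when index is negative or ≥ the number of '0'/'1' characters.
def Pre_flip_bit (binary : String) (index : Int) : Prop :=
  0 ≤ index ∧ index < ((binary.toList.filter (fun c => c == '0' || c == '1')).length : Int)
instance (binary : String) (index : Int) : Decidable (Pre_flip_bit binary index) := by
  unfold Pre_flip_bit; infer_instance
def pvWitness_flip_bit : String × Int := ("10 1", 2)

def Spec_flip_bit (binary : String) (index : Int) (out : String) : Prop := out = flip_bit_alt binary index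
instance (binary : String) (index : Int) (out : String) : Decidable (Spec_flip_bit binary index out) := by unfold Spec_flip_bit; infer_instance

-- ===== CLAIM (what is proved, stated in full; the proofs are below) =====
def Claim_equal_flip_bit : Prop := ∀ (binary : String) (index : Int), Dom_flip_bit binary index → Pre_flip_bit binary index → Spec_flip_bit binary index (flip_bit binary index)

-- ===== LEMMAS AND PROOFS =====

-- the flip-at-position computation of B, as a function of the (Int) position
def pvFlipAt (l : List Char) (p : Int) : List Char :=
  l.set p.toNat (if l.getD p.toNat ' ' == '0' then '1' else '0')

lemma pvPositions_cons (c : Char) (l : List Char) (s : Int) :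
    pvPositions (c :: l) s =
      (if c == '0' || c == '1' then [s] else []) ++ pvPositions l (s + 1) := by
  simp only [pvPositions, PySem.List.enumerate_cons, List.filter_cons]
  by_cases h : (c == '0' || c == '1') = true <;> simp [h]

lemma pvPositions_shift (l : List Char) (s : Int) :
    pvPositions l s = (pvPositions l 0).map (· + s) := by
  induction l generalizing s with
  | nil => simp [pvPositions]
  | cons c l ih =>
    rw [pvPositions_cons, pvPositions_cons, zero_add, ih (s + 1), ih 1]
    simp [List.map_map, Function.comp_def, add_comm, add_left_comm]
    split <;> simp

lemma pvPositions_nonneg (l : List Char) : ∀ q ∈ pvPositions l 0, 0 ≤ q := by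
  induction l with
  | nil => simp [pvPositions]
  | cons c l ih =>
    intro q hq
    rw [pvPositions_cons, zero_add, pvPositions_shift l 1] at hq
    rcases List.mem_append.1 hq with h | h
    · split at h <;> simp_all
    · obtain ⟨r, hr, rfl⟩ := List.mem_map.1 h
      have := ih r hr; omega

lemma pvPositions_length (l : List Char) (s : Int) :
    (pvPositions l s).length = (l.filter (fun c => c == '0' || c == '1')).length := by
  induction l generalizing s with
  | nil => simp [pvPositions]
  | cons c l ih =>
    rw [pvPositions_cons, List.filter_cons]
    split <;> simp [ih]

lemma pvFlipAt_cons (c : Char) (l : List Char) (q : Int) (hq : 0 ≤ q) :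
    pvFlipAt (c :: l) (q + 1) = c :: pvFlipAt l q := by
  have : (q + 1).toNat = q.toNat + 1 := by omega
  simp [pvFlipAt, this]

lemma pvGoA_eq (l : List Char) : ∀ (j : Nat) (k index : Int),
    index = k + j → j < (pvPositions l 0).length →
    pvGoA index l k = pvFlipAt l ((pvPositions l 0).getD j 0) := by
  induction l with
  | nil => intro j k index _ hj; simp [pvPositions] at hj
  | cons c l ih =>
    intro j k index hidx hj
    rw [pvPositions_cons, zero_add, pvPositions_shift l 1] at hj ⊢
    by_cases hb : (c == '0' || c == '1') = true
    · simp only [hb, if_pos] at hj ⊢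
      by_cases hk : k = index
      · have hj0 : j = 0 := by omega
        subst hj0 hk
        simp [pvGoA, hb, pvFlipAt, List.getD]
      · have hj0 : j ≠ 0 := by rintro rfl; simp at hidx; omega
        obtain ⟨j', rfl⟩ := Nat.exists_eq_succ_of_ne_zero hj0
        have hj' : j' < (pvPositions l 0).length := by simpa using hj
        have hget : ([(0 : Int)] ++ (pvPositions l 0).map (· + 1)).getD (j' + 1) 0
            = (pvPositions l 0).getD j' 0 + 1 := by
          have := List.getElem?_eq_getElem (l := pvPositions l 0) (by omega : j' < (pvPositions l 0).length)
          simp [List.getD, this]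
        rw [hget]
        have hq : 0 ≤ (pvPositions l 0).getD j' 0 := by
          rw [List.getD_eq_getElem _ _ hj']
          exact pvPositions_nonneg l _ (List.getElem_mem _)
        rw [pvFlipAt_cons _ _ _ hq]
        have : ¬ (k == index) = true := by simpa using hk
        simp only [pvGoA, hb, if_pos, this, if_neg, Bool.false_eq_true, not_false_iff]
        congr 1
        exact ih j' (k + 1) index (by push_cast at hidx ⊢; omega) hj'
    · simp only [hb, if_neg, List.nil_append, Bool.false_eq_true, not_false_iff] at hj ⊢
      simp only [List.length_map] at hj
      have hget : ((pvPositions l 0).map (· + 1)).getD j 0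
          = (pvPositions l 0).getD j 0 + 1 := by
        have := List.getElem?_eq_getElem (l := pvPositions l 0) hj
        simp [List.getD, this]
      rw [hget]
      have hq : 0 ≤ (pvPositions l 0).getD j 0 := by
        rw [List.getD_eq_getElem _ _ hj]
        exact pvPositions_nonneg l _ (List.getElem_mem _)
      rw [pvFlipAt_cons _ _ _ hq]
      simp only [pvGoA, hb, if_neg, Bool.false_eq_true, not_false_iff]
      congr 1
      exact ih j k index hidx hj

-- ===== VERDICT (by name: the statement is the Claim_ definition above) =====
theorem flip_bit_spec : Claim_equal_flip_bit := by
  intro binary index _ hpre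
  obtain ⟨h0, hlt⟩ := hpre
  unfold Spec_flip_bit flip_bit flip_bit_alt
  have hlen : index < ((pvPositions binary.toList 0).length : Int) := by
    rwa [pvPositions_length]
  rw [if_pos ⟨h0, hlen⟩]
  have hj : index.toNat < (pvPositions binary.toList 0).length := by omega
  rw [pvGoA_eq binary.toList index.toNat 0 index (by omega) hj]
  rfl
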